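-- pv_equiv track=rewrite | github.com/Zhgma/model2024 | test_mask.py | find_start_row
-- ===== SOURCE A (Python) =====
-- def find_start_row(label,single_range):
--     lineend=[5,12,18,24]
--     time=0
--     label=int(label)
--     for i in lineend:
--         if label<=i:
--             if time==0:
--                 return (label-1)*2*single_range+10
--             if time>0:
--                 return (label-lineend[time-1]-1)*2*single_range+10
--         time=time+1
-- ===== SOURCE B (Python) =====
-- def find_start_row(label, single_range):
--     lineend = [5, 12, 18, 24]
--     label = int(label)
--     # binary search: first index with lineend[idx] >= label (bisect_left)
--     lo, hi = 0, len(lineend)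
--     while lo < hi:
--         mid = (lo + hi) // 2
--         if lineend[mid] < label:
--             lo = mid + 1
--         else:
--             hi = mid
--     if lo == len(lineend):
--         return None
--     prev = 0 if lo == 0 else lineend[lo - 1]
--     return (label - prev - 1) * 2 * single_range + 10
-- ===== Notes on version B (the rewrite author's own statement) =====
-- stated objective: alternative
-- what changed: Replaces the sequential scan with a counter and two return branches by a hand-written binary search (bisect_left) over the sorted thresholds, with a single unified return using the previous boundary (0 for the first bucket).
import Mathlib
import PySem

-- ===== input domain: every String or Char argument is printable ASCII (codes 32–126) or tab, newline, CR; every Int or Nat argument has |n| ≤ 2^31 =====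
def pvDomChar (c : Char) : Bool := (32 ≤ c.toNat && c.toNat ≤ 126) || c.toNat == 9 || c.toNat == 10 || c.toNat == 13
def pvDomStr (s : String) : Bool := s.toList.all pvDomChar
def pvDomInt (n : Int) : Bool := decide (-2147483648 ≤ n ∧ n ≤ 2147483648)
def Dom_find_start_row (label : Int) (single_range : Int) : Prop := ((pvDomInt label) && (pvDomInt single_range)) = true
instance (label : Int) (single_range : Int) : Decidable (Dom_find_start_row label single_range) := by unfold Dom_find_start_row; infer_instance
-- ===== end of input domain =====

-- B replaces A's sequential scan over the thresholds by a hand-written binary search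
-- (bisect_left) with one unified return branch; objective: alternative (same cost on 4 items).

-- ===== PORT A =====
-- loop 'for i in lineend' with the counter 'time'; 'lineend[time-1]' is in range whenever
-- taken (time ∈ 1..3 for the fixed 4-element list), so pyGet? cannot actually return none;
-- getD 0 is never the value used.
def pvA_loop (full : List Int) (label single_range : Int) : List Int → Nat → Option Int
  | [], _ => none
  | i :: rest, time =>
    if label ≤ i then
      if time = 0 then some ((label - 1) * 2 * single_range + 10)
      else if time > 0 then
        some ((label - (PySem.List.pyGet? full (Int.ofNat time - 1)).getD 0 - 1) * 2 * single_range + 10)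
      else none
    else pvA_loop full label single_range rest (time + 1)

def find_start_row (label : Int) (single_range : Int) : Option Int :=
  let lineend : List Int := [5, 12, 18, 24]
  pvA_loop lineend label single_range lineend 0

-- ===== PORT B =====
-- hand-written bisect_left: first index lo with lineend[lo] ≥ label
def pvB_bisect (a : List Int) (x : Int) (lo hi : Nat) : Nat :=
  if _h : lo < hi then
    let mid := (lo + hi) / 2
    if (PySem.List.pyGet? a (Int.ofNat mid)).getD 0 < x then pvB_bisect a x (mid + 1) hi
    else pvB_bisect a x lo mid
  else lo
termination_by hi - lo
decreasing_by all_goals omega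

def find_start_row_alt (label : Int) (single_range : Int) : Option Int :=
  let lineend : List Int := [5, 12, 18, 24]
  let lo := pvB_bisect lineend label 0 lineend.length
  if lo = lineend.length then none
  else
    let prev : Int := if lo = 0 then 0 else (PySem.List.pyGet? lineend (Int.ofNat lo - 1)).getD 0
    some ((label - prev - 1) * 2 * single_range + 10)

-- ===== PRECONDITION & SPEC =====
def Spec_find_start_row (label : Int) (single_range : Int) (out : Option Int) : Prop := out = find_start_row_alt label single_range
instance (label : Int) (single_range : Int) (out : Option Int) : Decidable (Spec_find_start_row label single_range out) := by unfold Spec_find_start_row; infer_instance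

-- ===== CLAIM (what is proved, stated in full; the proofs are below) =====
def Claim_equal_find_start_row : Prop := ∀ (label : Int) (single_range : Int), Dom_find_start_row label single_range → Spec_find_start_row label single_range (find_start_row label single_range)

-- ===== LEMMAS AND PROOFS =====

-- ===== VERDICT (by name: the statement is the Claim_ definition above) =====
theorem find_start_row_spec : Claim_equal_find_start_row := by
  intro label s _
  unfold Spec_find_start_row find_start_row find_start_row_alt
  by_cases h5 : label ≤ 5
  · simp [pvA_loop, pvB_bisect, h5, PySem.List.pyGet?, PySem.List.pyIdx?,
      show ¬((18:Int) < label) by omega, show ¬((12:Int) < label) by omega,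
      show ¬((5:Int) < label) by omega]
  · by_cases h12 : label ≤ 12
    · simp [pvA_loop, pvB_bisect, h5, h12, PySem.List.pyGet?, PySem.List.pyIdx?,
        show ¬((18:Int) < label) by omega, show (5:Int) < label by omega,
        show ¬((12:Int) < label) by omega]
    · by_cases h18 : label ≤ 18
      · simp [pvA_loop, pvB_bisect, h5, h12, h18, PySem.List.pyGet?, PySem.List.pyIdx?,
          show ¬((18:Int) < label) by omega, show (12:Int) < label by omega]
      · by_cases h24 : label ≤ 24
        · simp [pvA_loop, pvB_bisect, h5, h12, h18, h24, PySem.List.pyGet?, PySem.List.pyIdx?,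
            show (18:Int) < label by omega, show ¬((24:Int) < label) by omega]
        · simp [pvA_loop, pvB_bisect, h5, h12, h18, h24, PySem.List.pyGet?, PySem.List.pyIdx?,
            show (18:Int) < label by omega, show (24:Int) < label by omega]
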